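-- pv_equiv track=rewrite | github.com/Zeydel/Advent-Of-Code | AoC15/Day15/Day15.py | getChoiceValue
-- ===== SOURCE A (Python) =====
-- def getChoiceValue(choice, ingredients):
--
--     # Init as 1 (we are gonna be multiplying)
--     choiceval = 1
--
--     # For every property
--     for i in range(len(ingredients[0])-1):
--
--         # Initially zero
--         propval = 0
--
--         # For every ingredient
--         for c, j in enumerate(ingredients):
--
--             # Add the number og spoons for that ingredient times the
--             # value for that property
--             propval += choice[c] * j[i]
--
--         # Limit by zero
--         if propval < 0:
--             propval = 0
--
--         # Multiply the property value
--         choiceval *= propval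
--
--     # And return the value
--     return choiceval
-- ===== SOURCE B (Python) =====
-- def getChoiceValue(choice, ingredients):
--     # Ingredient-major: one accumulation pass maintaining a vector of property
--     # sums, then a final clamp-and-multiply reduction pass.
--     propvals = [0] * (len(ingredients[0]) - 1)
--     for c, row in enumerate(ingredients):
--         propvals = [v + choice[c] * row[i] for i, v in enumerate(propvals)]
--     result = 1
--     for v in propvals:
--         result *= max(0, v)
--     return result
-- ===== Notes on version B (the rewrite author's own statement) =====
-- stated objective: alternative
-- what changed: Loop interchange with a changed accumulator structure: instead of recomputing a scalar property sum per property (property-major nested loops with clamping folded into the product loop), B makes one ingredient-major pass maintaining a vector of property-sum accumulators, then a separate final reduction pass clamping each sum and multiplying.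
import Mathlib
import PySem

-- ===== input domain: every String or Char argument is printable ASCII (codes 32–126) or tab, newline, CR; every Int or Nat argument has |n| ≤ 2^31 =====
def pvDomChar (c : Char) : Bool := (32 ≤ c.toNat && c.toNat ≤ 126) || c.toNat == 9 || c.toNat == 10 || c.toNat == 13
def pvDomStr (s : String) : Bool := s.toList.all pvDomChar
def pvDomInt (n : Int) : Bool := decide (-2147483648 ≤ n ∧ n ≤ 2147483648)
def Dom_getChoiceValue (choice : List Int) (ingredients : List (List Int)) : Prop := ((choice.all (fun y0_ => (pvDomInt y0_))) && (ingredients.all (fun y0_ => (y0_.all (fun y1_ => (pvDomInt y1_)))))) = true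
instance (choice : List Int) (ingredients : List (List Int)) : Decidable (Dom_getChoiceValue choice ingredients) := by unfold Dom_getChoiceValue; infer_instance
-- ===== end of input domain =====

-- B replaces A's property-major scalar recomputation by a single ingredient-major
-- pass over a vector of property-sum accumulators plus a final clamp-and-multiply
-- reduction (alternative decomposition, same asymptotic cost).


-- ===== PORT A =====
def getChoiceValue (choice : List Int) (ingredients : List (List Int)) : Int :=
  (PySem.List.pyRange 0 (((ingredients.headD []).length : Int) - 1) 1).foldl
    (fun choiceval i =>
      let propval := (PySem.List.enumerate ingredients 0).foldl
        (fun propval cj =>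
          propval + PySem.List.pyGetD choice cj.1 0 * PySem.List.pyGetD cj.2 i 0) 0
      let propval := if propval < 0 then 0 else propval
      choiceval * propval) 1

-- ===== PORT B =====
def getChoiceValue_alt (choice : List Int) (ingredients : List (List Int)) : Int :=
  let propvals0 := PySem.List.pyRepeat [(0 : Int)] (((ingredients.headD []).length : Int) - 1)
  let propvals := (PySem.List.enumerate ingredients 0).foldl
    (fun pv cr => (PySem.List.enumerate pv 0).map
      (fun iv => iv.2 + PySem.List.pyGetD choice cr.1 0 * PySem.List.pyGetD cr.2 iv.1 0))
    propvals0
  propvals.foldl (fun r v => r * max 0 v) 1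

-- ===== PRECONDITION & SPEC =====
-- Pre_ excludes exactly the inputs on which the Python A raises IndexError:
-- empty ingredients (ingredients[0]), and — when there is at least one property —
-- a choice list shorter than ingredients (choice[c]) or an ingredient row shorter
-- than the number of properties (j[i]).
def Pre_getChoiceValue (choice : List Int) (ingredients : List (List Int)) : Prop :=
  ingredients ≠ [] ∧
  (2 ≤ (ingredients.headD []).length →
    ingredients.length ≤ choice.length ∧
    ∀ r ∈ ingredients, (ingredients.headD []).length - 1 ≤ r.length)
instance (choice : List Int) (ingredients : List (List Int)) : Decidable (Pre_getChoiceValue choice ingredients) := by unfold Pre_getChoiceValue; infer_instance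
def pvWitness_getChoiceValue : List Int × List (List Int) := ([2, 3], [[1, -2, 6], [-1, 3, 8]])
def Spec_getChoiceValue (choice : List Int) (ingredients : List (List Int)) (out : Int) : Prop := out = getChoiceValue_alt choice ingredients
instance (choice : List Int) (ingredients : List (List Int)) (out : Int) : Decidable (Spec_getChoiceValue choice ingredients out) := by unfold Spec_getChoiceValue; infer_instance

-- ===== CLAIM (what is proved, stated in full; the proofs are below) =====
def Claim_equal_getChoiceValue : Prop := ∀ (choice : List Int) (ingredients : List (List Int)), Dom_getChoiceValue choice ingredients → Pre_getChoiceValue choice ingredients → Spec_getChoiceValue choice ingredients (getChoiceValue choice ingredients)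

-- ===== LEMMAS AND PROOFS =====

-- the per-property total over a list of (index, row) pairs
def pvT (choice : List Int) (ps : List (Int × List Int)) (i : Int) : Int :=
  (ps.map (fun cj => PySem.List.pyGetD choice cj.1 0 * PySem.List.pyGetD cj.2 i 0)).sum

theorem enum_map_enum {α β : Type} (vs : List α) (s : Int) (h : Int × α → β) :
    PySem.List.enumerate ((PySem.List.enumerate vs s).map h) s
      = (PySem.List.enumerate vs s).map (fun iv => (iv.1, h iv)) := by
  induction vs generalizing s with
  | nil => simp [PySem.List.enumerate_nil]
  | cons x xs ih => simp [PySem.List.enumerate_cons, ih]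

theorem fold_rows (choice : List Int) (ps : List (Int × List Int)) (vs : List Int) :
    ps.foldl
      (fun pv cr => (PySem.List.enumerate pv 0).map
        (fun iv => iv.2 + PySem.List.pyGetD choice cr.1 0 * PySem.List.pyGetD cr.2 iv.1 0))
      vs
    = (PySem.List.enumerate vs 0).map (fun iv => iv.2 + pvT choice ps iv.1) := by
  induction ps generalizing vs with
  | nil => simp [pvT]
  | cons p ps ih =>
      simp only [List.foldl_cons, ih, enum_map_enum, List.map_map]
      refine List.map_congr_left ?_
      intro iv _
      simp [pvT, add_assoc]

theorem pyGetD_replicate_zero (k : Nat) (j : Int) :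
    PySem.List.pyGetD (List.replicate k (0 : Int)) j 0 = 0 := by
  unfold PySem.List.pyGetD PySem.List.pyGet?
  rcases PySem.List.pyIdx? (List.replicate k (0:Int)).length j with _ | n
  · rfl
  · simp

theorem pyRange_toNat (m : Int) :
    PySem.List.pyRange 0 ((m.toNat : Nat) : Int) 1 = PySem.List.pyRange 0 m 1 := by
  rw [PySem.List.pyRange_one, PySem.List.pyRange_one]
  have h : ((((m.toNat : Nat) : Int)) - 0).toNat = (m - 0).toNat := by omega
  rw [h]

theorem getChoiceValue_alt_closed (choice : List Int) (ingredients : List (List Int)) :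
    getChoiceValue_alt choice ingredients
      = (PySem.List.pyRange 0 (((ingredients.headD []).length : Int) - 1) 1).foldl
          (fun r i => r * max 0 (pvT choice (PySem.List.enumerate ingredients 0) i)) 1 := by
  simp only [getChoiceValue_alt]
  rw [PySem.List.pyRepeat_singleton, fold_rows,
      PySem.List.enumerate_eq_map_pyRange (d := (0:Int)), List.map_map, List.foldl_map]
  simp only [PySem.List.len_eq, List.length_replicate, pyGetD_replicate_zero]
  rw [pyRange_toNat]
  refine PySem.List.foldl_congr_mem _ _ _ _ ?_
  intro acc j _
  simp

theorem getChoiceValue_closed (choice : List Int) (ingredients : List (List Int)) :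
    getChoiceValue choice ingredients
      = (PySem.List.pyRange 0 (((ingredients.headD []).length : Int) - 1) 1).foldl
          (fun r i => r * max 0 (pvT choice (PySem.List.enumerate ingredients 0) i)) 1 := by
  unfold getChoiceValue
  refine PySem.List.foldl_congr_mem _ _ _ _ ?_
  intro cv i _
  rw [PySem.List.foldl_add
      (g := fun cj : Int × List Int =>
        PySem.List.pyGetD choice cj.1 0 * PySem.List.pyGetD cj.2 i 0)]
  simp only [zero_add, pvT]
  split_ifs with h
  · simp [max_eq_left h.le]
  · rw [max_eq_right (not_lt.1 h)]

-- ===== VERDICT (by name: the statement is the Claim_ definition above) =====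
theorem getChoiceValue_spec : Claim_equal_getChoiceValue := by
  intro choice ingredients _ _
  unfold Spec_getChoiceValue
  rw [getChoiceValue_closed, getChoiceValue_alt_closed]
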